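-- pv_equiv track=rewrite | github.com/SachinVenugopalan30/JobGlove | backend/services/document_parser.py | _split_header_body
-- ===== SOURCE A (Python) =====
-- def _split_header_body(resume_text: str) -> tuple[list[str], list[str]]:
--     """
--     Split resume text into header lines and body lines.
--
--     Header is the leading block of non-empty lines before the first blank line.
--     If there is no blank line, only the first non-empty line is treated as the header.
--     """
--     raw_lines = resume_text.split('\n')
--     header_lines: list[str] = []
--     body_lines: list[str] = []
--
--     # Find the first blank line that separates header from body
--     blank_found = False
--     for line in raw_lines:
--         stripped = line.strip()
--         if not blank_found:
--             if stripped == '':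
--                 blank_found = True
--             else:
--                 header_lines.append(stripped)
--         else:
--             body_lines.append(line)
--
--     # No blank line found: treat only the very first non-empty line as the header
--     if not blank_found and len(header_lines) > 1:
--         body_lines = header_lines[1:]
--         header_lines = header_lines[:1]
--
--     return header_lines, body_lines
-- ===== SOURCE B (Python) =====
-- def _split_header_body(resume_text: str) -> tuple[list[str], list[str]]:
--     raw_lines = resume_text.split('\n')
--     idx = next((i for i, l in enumerate(raw_lines) if l.strip() == ''), None)
--     if idx is not None:
--         return [l.strip() for l in raw_lines[:idx]], raw_lines[idx + 1:]
--     header = [l.strip() for l in raw_lines]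
--     if len(header) > 1:
--         return header[:1], header[1:]
--     return header, []
-- ===== Notes on version B (the rewrite author's own statement) =====
-- stated objective: simpler
-- what changed: Replaces the stateful blank_found accumulator loop plus post-hoc list surgery by finding the first blank-line index once and slicing: header = stripped prefix, body = raw suffix, with the no-blank case handled by slicing the stripped list.
import Mathlib
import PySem

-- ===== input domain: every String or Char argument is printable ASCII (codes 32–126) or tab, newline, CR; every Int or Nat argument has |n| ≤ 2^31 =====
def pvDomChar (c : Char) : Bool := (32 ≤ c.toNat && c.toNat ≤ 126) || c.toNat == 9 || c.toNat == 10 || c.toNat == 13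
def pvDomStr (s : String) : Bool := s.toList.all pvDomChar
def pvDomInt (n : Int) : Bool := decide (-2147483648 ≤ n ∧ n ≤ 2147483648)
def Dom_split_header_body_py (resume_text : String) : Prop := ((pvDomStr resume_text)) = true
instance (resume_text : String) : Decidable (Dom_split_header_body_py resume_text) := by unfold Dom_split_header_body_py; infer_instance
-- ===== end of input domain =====

-- B replaces A's stateful blank_found loop + post-hoc surgery by one findIdx?-and-slice decomposition (objective: simpler); return values are equal everywhere.

-- ===== PORT A =====
-- loop body of A's for-loop: state = (blank_found, header_lines, body_lines)
def pvStepA (st : Bool × List String × List String) (line : String) : Bool × List String × List String :=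
  let stripped := PySem.Str.strip line
  if !st.1 then
    if stripped = "" then (true, st.2.1, st.2.2)
    else (st.1, st.2.1 ++ [stripped], st.2.2)
  else (st.1, st.2.1, st.2.2 ++ [line])

def split_header_body_py (resume_text : String) : List String × List String :=
  let raw_lines := (PySem.Str.split? resume_text "\n").getD []
  let st := raw_lines.foldl pvStepA (false, [], [])
  if !st.1 && st.2.1.length > 1 then (st.2.1.take 1, st.2.1.drop 1)
  else (st.2.1, st.2.2)

-- ===== PORT B =====
def split_header_body_py_alt (resume_text : String) : List String × List String :=
  let raw_lines := (PySem.Str.split? resume_text "\n").getD []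
  match raw_lines.findIdx? (fun l => PySem.Str.strip l == "") with
  | some i => ((raw_lines.take i).map PySem.Str.strip, raw_lines.drop (i + 1))
  | none =>
    let header := raw_lines.map PySem.Str.strip
    if header.length > 1 then (header.take 1, header.drop 1) else (header, [])

-- ===== PRECONDITION & SPEC =====
def Spec_split_header_body_py (resume_text : String) (out : List String × List String) : Prop := out = split_header_body_py_alt resume_text
instance (resume_text : String) (out : List String × List String) : Decidable (Spec_split_header_body_py resume_text out) := by unfold Spec_split_header_body_py; infer_instance

-- ===== CLAIM (what is proved, stated in full; the proofs are below) =====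
def Claim_equal_split_header_body_py : Prop := ∀ (resume_text : String), Dom_split_header_body_py resume_text → Spec_split_header_body_py resume_text (split_header_body_py resume_text)

-- ===== LEMMAS AND PROOFS =====

theorem pvFoldA_true (lines : List String) (h b : List String) :
    lines.foldl pvStepA (true, h, b) = (true, h, b ++ lines) := by
  induction lines generalizing b with
  | nil => simp
  | cons l rest ih => simp [pvStepA, ih]

theorem pvFoldA_false (lines : List String) (h : List String) :
    lines.foldl pvStepA (false, h, []) =
      match lines.findIdx? (fun l => PySem.Str.strip l == "") with
      | some i => (true, h ++ (lines.take i).map PySem.Str.strip, lines.drop (i + 1))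
      | none => (false, h ++ lines.map PySem.Str.strip, []) := by
  induction lines generalizing h with
  | nil => simp
  | cons l rest ih =>
    by_cases hl : PySem.Str.strip l = ""
    · simp [List.findIdx?_cons, pvStepA, hl, pvFoldA_true]
    · simp only [List.foldl_cons, pvStepA, hl, if_false, Bool.not_false, if_true]
      rw [ih (h ++ [PySem.Str.strip l])]
      simp [List.findIdx?_cons, hl]
      cases rest.findIdx? (fun l => PySem.Str.strip l == "") <;> simp

-- ===== VERDICT (by name: the statement is the Claim_ definition above) =====
theorem split_header_body_py_spec : Claim_equal_split_header_body_py := by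
  intro s _
  unfold Spec_split_header_body_py split_header_body_py split_header_body_py_alt
  dsimp only
  generalize (PySem.Str.split? s "\n").getD [] = lines
  rw [pvFoldA_false lines []]
  cases hf : lines.findIdx? (fun l => PySem.Str.strip l == "") with
  | some i => simp
  | none =>
    simp only [List.nil_append]
    by_cases hlen : (lines.map PySem.Str.strip).length > 1 <;> simp
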